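-- pv_equiv track=rewrite | github.com/zen-integration/algorithm_code | t退避/main_bit_board.py | _make_move_bb
-- ===== SOURCE A (Python) =====
-- from typing import List, Tuple, Optional
--
-- def _make_move_bb(black_board: int, white_board: int, x: int, y: int,
--                  player: int) -> Tuple[int, int, int]:
--     """ビットボードに手を打ち、新しいボードとz座標を返す"""
--     occupied = black_board | white_board
--
--     # 下から順に空いている位置を探す
--     for z in range(4):
--         bit_pos = z * 16 + y * 4 + x
--         if not (occupied & (1 << bit_pos)):
--             if player == 1:  # 黒
--                 return black_board | (1 << bit_pos), white_board, z
--             else:  # 白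
--                 return black_board, white_board | (1 << bit_pos), z
--
--     return black_board, white_board, -1  # 置けない場合
-- ===== SOURCE B (Python) =====
-- _LOWEST_EMPTY = (0, 1, 0, 2, 0, 1, 0, 3, 0, 1, 0, 2, 0, 1, 0, -1)
--
-- def _make_move_bb(black_board: int, white_board: int, x: int, y: int,
--                   player: int):
--     """Branch-free slot finding: pack the column's four occupancy bits into a
--     nibble and read the lowest empty level from a 16-entry table."""
--     base = y * 4 + x
--     occ = (black_board | white_board) >> base
--     n = (occ & 1) | ((occ >> 16) & 1) << 1 | ((occ >> 32) & 1) << 2 | ((occ >> 48) & 1) << 3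
--     z = _LOWEST_EMPTY[n]
--     if z < 0:
--         return black_board, white_board, -1
--     bit = 1 << (base + 16 * z)
--     if player == 1:
--         return black_board | bit, white_board, z
--     return black_board, white_board | bit, z
-- ===== Notes on version B (the rewrite author's own statement) =====
-- stated objective: alternative
-- what changed: Replaces A's early-return scan over z=0..3 (one masked bit test per level) by a branch-free bit extraction: shift the occupancy by the column base, pack the column's four occupancy bits into a nibble, and read the lowest empty level from a fixed 16-entry table.
import Mathlib
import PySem

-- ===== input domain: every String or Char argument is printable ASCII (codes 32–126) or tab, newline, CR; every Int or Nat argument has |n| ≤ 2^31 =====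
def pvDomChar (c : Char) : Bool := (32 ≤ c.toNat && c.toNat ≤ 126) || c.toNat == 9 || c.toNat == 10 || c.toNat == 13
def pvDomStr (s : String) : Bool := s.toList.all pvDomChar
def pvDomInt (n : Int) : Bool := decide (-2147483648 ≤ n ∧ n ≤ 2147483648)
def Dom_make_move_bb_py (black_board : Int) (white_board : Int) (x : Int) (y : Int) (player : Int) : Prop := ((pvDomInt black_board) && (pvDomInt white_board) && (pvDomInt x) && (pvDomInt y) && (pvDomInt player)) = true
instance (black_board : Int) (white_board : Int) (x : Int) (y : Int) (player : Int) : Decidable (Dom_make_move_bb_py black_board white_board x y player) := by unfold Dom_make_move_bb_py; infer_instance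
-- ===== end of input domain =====

-- B replaces A's early-return scan over the four levels by packing the column's
-- occupancy bits into a nibble and reading the lowest empty level from a table
-- (objective: alternative, same O(1) cost).

-- ===== PORT A =====
-- the 'for z in range(4)' loop with its early returns
def pvLoopA (black_board white_board x y player occupied : Int) : List Int → Int × Int × Int
  | [] => (black_board, white_board, -1)
  | z :: zs =>
      let bit_pos := z * 16 + y * 4 + x
      if PySem.Int.band occupied ((1:Int) <<< bit_pos.toNat) = 0 then
        if player = 1 then
          (PySem.Int.bor black_board ((1:Int) <<< bit_pos.toNat), white_board, z)
        else
          (black_board, PySem.Int.bor white_board ((1:Int) <<< bit_pos.toNat), z)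
      else pvLoopA black_board white_board x y player occupied zs

def make_move_bb_py (black_board : Int) (white_board : Int) (x : Int) (y : Int) (player : Int) : Int × Int × Int :=
  let occupied := PySem.Int.bor black_board white_board
  pvLoopA black_board white_board x y player occupied (PySem.List.pyRange 0 4 1)

-- ===== PORT B =====
def pvLowestEmpty : List Int := [0, 1, 0, 2, 0, 1, 0, 3, 0, 1, 0, 2, 0, 1, 0, -1]

def make_move_bb_py_alt (black_board : Int) (white_board : Int) (x : Int) (y : Int) (player : Int) : Int × Int × Int :=
  let base := y * 4 + x
  let occ := (PySem.Int.bor black_board white_board) >>> base.toNat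
  let n := PySem.Int.bor (PySem.Int.band occ 1)
            (PySem.Int.bor ((PySem.Int.band (occ >>> (16:Nat)) 1) <<< (1:Nat))
              (PySem.Int.bor ((PySem.Int.band (occ >>> (32:Nat)) 1) <<< (2:Nat))
                ((PySem.Int.band (occ >>> (48:Nat)) 1) <<< (3:Nat))))
  -- n is always in [0, 16), so pyGetD coincides with Python's list indexing
  let z := PySem.List.pyGetD pvLowestEmpty n (-1)
  if z < 0 then (black_board, white_board, -1)
  else
    let bit := (1:Int) <<< (base + 16 * z).toNat
    if player = 1 then (PySem.Int.bor black_board bit, white_board, z)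
    else (black_board, PySem.Int.bor white_board bit, z)

-- ===== PRECONDITION & SPEC =====
-- Pre_ excludes exactly the inputs with y*4 + x < 0, where Python's '1 << bit_pos'
-- (and B's '>> base') raises ValueError: negative shift count.
def Pre_make_move_bb_py (black_board : Int) (white_board : Int) (x : Int) (y : Int) (player : Int) : Prop :=
  0 ≤ y * 4 + x
instance (black_board : Int) (white_board : Int) (x : Int) (y : Int) (player : Int) : Decidable (Pre_make_move_bb_py black_board white_board x y player) := by unfold Pre_make_move_bb_py; infer_instance

def pvWitness_make_move_bb_py : Int × Int × Int × Int × Int := (1, 2, 1, 2, 1)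

def Spec_make_move_bb_py (black_board : Int) (white_board : Int) (x : Int) (y : Int) (player : Int) (out : Int × Int × Int) : Prop := out = make_move_bb_py_alt black_board white_board x y player
instance (black_board : Int) (white_board : Int) (x : Int) (y : Int) (player : Int) (out : Int × Int × Int) : Decidable (Spec_make_move_bb_py black_board white_board x y player out) := by unfold Spec_make_move_bb_py; infer_instance

-- ===== CLAIM (what is proved, stated in full; the proofs are below) =====
def Claim_equal_make_move_bb_py : Prop := ∀ (black_board : Int) (white_board : Int) (x : Int) (y : Int) (player : Int), Dom_make_move_bb_py black_board white_board x y player → Pre_make_move_bb_py black_board white_board x y player → Spec_make_move_bb_py black_board white_board x y player (make_move_bb_py black_board white_board x y player)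

-- ===== LEMMAS AND PROOFS =====

-- the Nat core of pvKeyBit: testing bit k by masking equals testing parity after shifting
theorem pvNatBit (a k : Nat) : (a &&& 2^k = 0) ↔ ((a >>> k) &&& 1 = 0) := by
  rw [Nat.and_two_pow, Nat.and_one_is_mod, Nat.shiftRight_eq_div_pow]
  rcases Nat.mod_two_eq_zero_or_one (a / 2^k) with h | h <;>
    rcases hb : a.testBit k with _ | _ <;>
      simp_all [Nat.testBit, Nat.shiftRight_eq_div_pow]

-- A's bit test 'occ & (1 << k) == 0' equals B's '(occ >> k) & 1 == 0', for every Int occ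
theorem pvKeyBit (a : Int) (k : Nat) :
    (PySem.Int.band a ((1:Int) <<< k) = 0) ↔ (PySem.Int.band (a >>> k) 1 = 0) := by
  have hpow : (1:Int) <<< k = ((2^k : Nat) : Int) := by
    rw [Int.shiftLeft_eq]; push_cast; ring
  by_cases ha : 0 ≤ a
  · obtain ⟨m, rfl⟩ := Int.eq_ofNat_of_zero_le ha
    have hs : ((m:Int)) >>> k = ((m >>> k : Nat) : Int) := by simp [Int.shiftRight_eq]
    have h1 : (1:Int) = ((1:Nat):Int) := by norm_num
    rw [hpow, hs, h1, PySem.Int.band_natCast, PySem.Int.band_natCast]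
    rw [Nat.cast_eq_zero, Nat.cast_eq_zero]
    exact pvNatBit m k
  · replace ha : a < 0 := by omega
    set m := (-a-1).toNat with hm
    have ham : a = -(m:Int) - 1 := by omega
    have hs : a >>> k = -((m >>> k : Nat) : Int) - 1 := by
      rw [ham]
      have : (-(m:Int)-1) = Int.negSucc m := by simp [Int.negSucc_eq]; ring
      rw [this, Int.shiftRight_eq]
      show Int.negSucc (m >>> k) = _
      simp [Int.negSucc_eq]; ring
    rw [hpow, hs, ham, PySem.Int.band, PySem.Int.band]
    have h1 : ¬ (0:Int) ≤ -(m:Int) - 1 := by omega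
    have h2 : ¬ (0:Int) ≤ -((m >>> k : Nat) : Int) - 1 := by
      have : (0:Nat) ≤ m >>> k := Nat.zero_le _
      omega
    have h3 : ((0:Int) ≤ ((2^k : Nat) : Int)) := by positivity
    simp only [h1, h2, if_false, h3, if_true, if_pos (by norm_num : (0:Int) ≤ 1)]
    have e1 : (-(-(m:Int) - 1) - 1).toNat = m := by omega
    have e2 : (-(-((m >>> k : Nat) : Int) - 1) - 1).toNat = m >>> k := by omega
    rw [e1, e2, Int.toNat_natCast, Int.toNat_one]
    rw [Nat.cast_eq_zero, Nat.cast_eq_zero]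
    have hp : 2^k &&& m = 2^k * ((m.testBit k).toNat) := Nat.two_pow_and m k
    have hq : m.testBit k = (1 &&& (m >>> k) != 0) := rfl
    have hqle : 1 &&& (m >>> k) ≤ 1 := Nat.and_le_left
    have hple : 2^k &&& m ≤ 2^k := Nat.and_le_left
    have hpk : (1:Nat) ≤ 2^k := Nat.one_le_two_pow
    rcases hb : m.testBit k with _ | _
    · rw [hb] at hp hq
      have hp0 : 2^k &&& m = 0 := by rw [hp]; simp
      have hq0 : 1 &&& (m >>> k) = 0 := by simpa using hq.symm
      omega
    · rw [hb] at hp hq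
      have hp1 : 2^k &&& m = 2^k := by rw [hp]; simp
      have hq1 : 1 &&& (m >>> k) ≠ 0 := by simpa using hq.symm
      omega

theorem pvBitVal (v : Int) : PySem.Int.band v 1 = 0 ∨ PySem.Int.band v 1 = 1 := by
  rw [PySem.Int.band_one]
  have h1 := PySem.Int.mod_nonneg v (by norm_num : (0:Int) < 2)
  have h2 := PySem.Int.mod_lt v (by norm_num : (0:Int) < 2)
  omega

-- ===== VERDICT (by name: the statement is the Claim_ definition above) =====
theorem make_move_bb_py_spec : Claim_equal_make_move_bb_py := by
  intro black_board white_board x y player _hdom hpre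
  unfold Spec_make_move_bb_py
  obtain ⟨b, hb⟩ := Int.eq_ofNat_of_zero_le hpre
  have hr : PySem.List.pyRange 0 4 1 = [0, 1, 2, 3] := by decide
  simp only [make_move_bb_py, make_move_bb_py_alt, hr, pvLoopA]
  rw [show ((0:Int) * 16 + y * 4 + x).toNat = b by omega,
      show ((1:Int) * 16 + y * 4 + x).toNat = b + 16 by omega,
      show ((2:Int) * 16 + y * 4 + x).toNat = b + 32 by omega,
      show ((3:Int) * 16 + y * 4 + x).toNat = b + 48 by omega,
      show (y * 4 + x).toNat = b by omega]
  have k0 : (PySem.Int.band (PySem.Int.bor black_board white_board) ((1:Int) <<< b) = 0) ↔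
      (PySem.Int.band ((PySem.Int.bor black_board white_board) >>> b) 1 = 0) :=
    pvKeyBit _ b
  have k1 : (PySem.Int.band (PySem.Int.bor black_board white_board) ((1:Int) <<< (b + 16)) = 0) ↔
      (PySem.Int.band (((PySem.Int.bor black_board white_board) >>> b) >>> (16:Nat)) 1 = 0) := by
    rw [pvKeyBit _ (b + 16), Int.shiftRight_add]
  have k2 : (PySem.Int.band (PySem.Int.bor black_board white_board) ((1:Int) <<< (b + 32)) = 0) ↔
      (PySem.Int.band (((PySem.Int.bor black_board white_board) >>> b) >>> (32:Nat)) 1 = 0) := by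
    rw [pvKeyBit _ (b + 32), Int.shiftRight_add]
  have k3 : (PySem.Int.band (PySem.Int.bor black_board white_board) ((1:Int) <<< (b + 48)) = 0) ↔
      (PySem.Int.band (((PySem.Int.bor black_board white_board) >>> b) >>> (48:Nat)) 1 = 0) := by
    rw [pvKeyBit _ (b + 48), Int.shiftRight_add]
  rcases pvBitVal (((PySem.Int.bor black_board white_board) >>> b)) with h0 | h0 <;>
  rcases pvBitVal ((((PySem.Int.bor black_board white_board) >>> b) >>> (16:Nat))) with h1 | h1 <;>
  rcases pvBitVal ((((PySem.Int.bor black_board white_board) >>> b) >>> (32:Nat))) with h2 | h2 <;>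
  rcases pvBitVal ((((PySem.Int.bor black_board white_board) >>> b) >>> (48:Nat))) with h3 | h3

  · -- bits (v0,v1,v2,v3) = (0,0,0,0)
    rw [h0, h1, h2, h3]
    rw [if_pos (k0.mpr h0)]
    rw [show PySem.List.pyGetD pvLowestEmpty (PySem.Int.bor (0:Int) (PySem.Int.bor ((0:Int) <<< (1:Nat)) (PySem.Int.bor ((0:Int) <<< (2:Nat)) ((0:Int) <<< (3:Nat))))) (-1) = (0:Int) by decide]
    rw [if_neg (by norm_num : ¬ ((0:Int) < 0))]
    rw [show (y * 4 + x + 16 * (0:Int)).toNat = b by omega]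
  · -- bits (v0,v1,v2,v3) = (0,0,0,1)
    rw [h0, h1, h2, h3]
    rw [if_pos (k0.mpr h0)]
    rw [show PySem.List.pyGetD pvLowestEmpty (PySem.Int.bor (0:Int) (PySem.Int.bor ((0:Int) <<< (1:Nat)) (PySem.Int.bor ((0:Int) <<< (2:Nat)) ((1:Int) <<< (3:Nat))))) (-1) = (0:Int) by decide]
    rw [if_neg (by norm_num : ¬ ((0:Int) < 0))]
    rw [show (y * 4 + x + 16 * (0:Int)).toNat = b by omega]
  · -- bits (v0,v1,v2,v3) = (0,0,1,0)
    rw [h0, h1, h2, h3]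
    rw [if_pos (k0.mpr h0)]
    rw [show PySem.List.pyGetD pvLowestEmpty (PySem.Int.bor (0:Int) (PySem.Int.bor ((0:Int) <<< (1:Nat)) (PySem.Int.bor ((1:Int) <<< (2:Nat)) ((0:Int) <<< (3:Nat))))) (-1) = (0:Int) by decide]
    rw [if_neg (by norm_num : ¬ ((0:Int) < 0))]
    rw [show (y * 4 + x + 16 * (0:Int)).toNat = b by omega]
  · -- bits (v0,v1,v2,v3) = (0,0,1,1)
    rw [h0, h1, h2, h3]
    rw [if_pos (k0.mpr h0)]
    rw [show PySem.List.pyGetD pvLowestEmpty (PySem.Int.bor (0:Int) (PySem.Int.bor ((0:Int) <<< (1:Nat)) (PySem.Int.bor ((1:Int) <<< (2:Nat)) ((1:Int) <<< (3:Nat))))) (-1) = (0:Int) by decide]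
    rw [if_neg (by norm_num : ¬ ((0:Int) < 0))]
    rw [show (y * 4 + x + 16 * (0:Int)).toNat = b by omega]
  · -- bits (v0,v1,v2,v3) = (0,1,0,0)
    rw [h0, h1, h2, h3]
    rw [if_pos (k0.mpr h0)]
    rw [show PySem.List.pyGetD pvLowestEmpty (PySem.Int.bor (0:Int) (PySem.Int.bor ((1:Int) <<< (1:Nat)) (PySem.Int.bor ((0:Int) <<< (2:Nat)) ((0:Int) <<< (3:Nat))))) (-1) = (0:Int) by decide]
    rw [if_neg (by norm_num : ¬ ((0:Int) < 0))]
    rw [show (y * 4 + x + 16 * (0:Int)).toNat = b by omega]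
  · -- bits (v0,v1,v2,v3) = (0,1,0,1)
    rw [h0, h1, h2, h3]
    rw [if_pos (k0.mpr h0)]
    rw [show PySem.List.pyGetD pvLowestEmpty (PySem.Int.bor (0:Int) (PySem.Int.bor ((1:Int) <<< (1:Nat)) (PySem.Int.bor ((0:Int) <<< (2:Nat)) ((1:Int) <<< (3:Nat))))) (-1) = (0:Int) by decide]
    rw [if_neg (by norm_num : ¬ ((0:Int) < 0))]
    rw [show (y * 4 + x + 16 * (0:Int)).toNat = b by omega]
  · -- bits (v0,v1,v2,v3) = (0,1,1,0)
    rw [h0, h1, h2, h3]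
    rw [if_pos (k0.mpr h0)]
    rw [show PySem.List.pyGetD pvLowestEmpty (PySem.Int.bor (0:Int) (PySem.Int.bor ((1:Int) <<< (1:Nat)) (PySem.Int.bor ((1:Int) <<< (2:Nat)) ((0:Int) <<< (3:Nat))))) (-1) = (0:Int) by decide]
    rw [if_neg (by norm_num : ¬ ((0:Int) < 0))]
    rw [show (y * 4 + x + 16 * (0:Int)).toNat = b by omega]
  · -- bits (v0,v1,v2,v3) = (0,1,1,1)
    rw [h0, h1, h2, h3]
    rw [if_pos (k0.mpr h0)]
    rw [show PySem.List.pyGetD pvLowestEmpty (PySem.Int.bor (0:Int) (PySem.Int.bor ((1:Int) <<< (1:Nat)) (PySem.Int.bor ((1:Int) <<< (2:Nat)) ((1:Int) <<< (3:Nat))))) (-1) = (0:Int) by decide]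
    rw [if_neg (by norm_num : ¬ ((0:Int) < 0))]
    rw [show (y * 4 + x + 16 * (0:Int)).toNat = b by omega]
  · -- bits (v0,v1,v2,v3) = (1,0,0,0)
    rw [h0, h1, h2, h3]
    rw [if_neg (by simp [k0, h0])]
    rw [if_pos (k1.mpr h1)]
    rw [show PySem.List.pyGetD pvLowestEmpty (PySem.Int.bor (1:Int) (PySem.Int.bor ((0:Int) <<< (1:Nat)) (PySem.Int.bor ((0:Int) <<< (2:Nat)) ((0:Int) <<< (3:Nat))))) (-1) = (1:Int) by decide]
    rw [if_neg (by norm_num : ¬ ((1:Int) < 0))]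
    rw [show (y * 4 + x + 16 * (1:Int)).toNat = b + 16 by omega]
  · -- bits (v0,v1,v2,v3) = (1,0,0,1)
    rw [h0, h1, h2, h3]
    rw [if_neg (by simp [k0, h0])]
    rw [if_pos (k1.mpr h1)]
    rw [show PySem.List.pyGetD pvLowestEmpty (PySem.Int.bor (1:Int) (PySem.Int.bor ((0:Int) <<< (1:Nat)) (PySem.Int.bor ((0:Int) <<< (2:Nat)) ((1:Int) <<< (3:Nat))))) (-1) = (1:Int) by decide]
    rw [if_neg (by norm_num : ¬ ((1:Int) < 0))]
    rw [show (y * 4 + x + 16 * (1:Int)).toNat = b + 16 by omega]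
  · -- bits (v0,v1,v2,v3) = (1,0,1,0)
    rw [h0, h1, h2, h3]
    rw [if_neg (by simp [k0, h0])]
    rw [if_pos (k1.mpr h1)]
    rw [show PySem.List.pyGetD pvLowestEmpty (PySem.Int.bor (1:Int) (PySem.Int.bor ((0:Int) <<< (1:Nat)) (PySem.Int.bor ((1:Int) <<< (2:Nat)) ((0:Int) <<< (3:Nat))))) (-1) = (1:Int) by decide]
    rw [if_neg (by norm_num : ¬ ((1:Int) < 0))]
    rw [show (y * 4 + x + 16 * (1:Int)).toNat = b + 16 by omega]
  · -- bits (v0,v1,v2,v3) = (1,0,1,1)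
    rw [h0, h1, h2, h3]
    rw [if_neg (by simp [k0, h0])]
    rw [if_pos (k1.mpr h1)]
    rw [show PySem.List.pyGetD pvLowestEmpty (PySem.Int.bor (1:Int) (PySem.Int.bor ((0:Int) <<< (1:Nat)) (PySem.Int.bor ((1:Int) <<< (2:Nat)) ((1:Int) <<< (3:Nat))))) (-1) = (1:Int) by decide]
    rw [if_neg (by norm_num : ¬ ((1:Int) < 0))]
    rw [show (y * 4 + x + 16 * (1:Int)).toNat = b + 16 by omega]
  · -- bits (v0,v1,v2,v3) = (1,1,0,0)
    rw [h0, h1, h2, h3]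
    rw [if_neg (by simp [k0, h0])]
    rw [if_neg (by simp [k1, h1])]
    rw [if_pos (k2.mpr h2)]
    rw [show PySem.List.pyGetD pvLowestEmpty (PySem.Int.bor (1:Int) (PySem.Int.bor ((1:Int) <<< (1:Nat)) (PySem.Int.bor ((0:Int) <<< (2:Nat)) ((0:Int) <<< (3:Nat))))) (-1) = (2:Int) by decide]
    rw [if_neg (by norm_num : ¬ ((2:Int) < 0))]
    rw [show (y * 4 + x + 16 * (2:Int)).toNat = b + 32 by omega]
  · -- bits (v0,v1,v2,v3) = (1,1,0,1)
    rw [h0, h1, h2, h3]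
    rw [if_neg (by simp [k0, h0])]
    rw [if_neg (by simp [k1, h1])]
    rw [if_pos (k2.mpr h2)]
    rw [show PySem.List.pyGetD pvLowestEmpty (PySem.Int.bor (1:Int) (PySem.Int.bor ((1:Int) <<< (1:Nat)) (PySem.Int.bor ((0:Int) <<< (2:Nat)) ((1:Int) <<< (3:Nat))))) (-1) = (2:Int) by decide]
    rw [if_neg (by norm_num : ¬ ((2:Int) < 0))]
    rw [show (y * 4 + x + 16 * (2:Int)).toNat = b + 32 by omega]
  · -- bits (v0,v1,v2,v3) = (1,1,1,0)
    rw [h0, h1, h2, h3]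
    rw [if_neg (by simp [k0, h0])]
    rw [if_neg (by simp [k1, h1])]
    rw [if_neg (by simp [k2, h2])]
    rw [if_pos (k3.mpr h3)]
    rw [show PySem.List.pyGetD pvLowestEmpty (PySem.Int.bor (1:Int) (PySem.Int.bor ((1:Int) <<< (1:Nat)) (PySem.Int.bor ((1:Int) <<< (2:Nat)) ((0:Int) <<< (3:Nat))))) (-1) = (3:Int) by decide]
    rw [if_neg (by norm_num : ¬ ((3:Int) < 0))]
    rw [show (y * 4 + x + 16 * (3:Int)).toNat = b + 48 by omega]
  · -- bits (v0,v1,v2,v3) = (1,1,1,1)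
    rw [h0, h1, h2, h3]
    rw [if_neg (by simp [k0, h0])]
    rw [if_neg (by simp [k1, h1])]
    rw [if_neg (by simp [k2, h2])]
    rw [if_neg (by simp [k3, h3])]
    rw [show PySem.List.pyGetD pvLowestEmpty (PySem.Int.bor (1:Int) (PySem.Int.bor ((1:Int) <<< (1:Nat)) (PySem.Int.bor ((1:Int) <<< (2:Nat)) ((1:Int) <<< (3:Nat))))) (-1) = (-1:Int) by decide]
    rw [if_pos (by norm_num : ((-1:Int) < 0))]
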